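-- pv_equiv track=rewrite | github.com/rafael-mansurov/tg-ws-proxy-android | proxy/lan_ipv4.py | _pick_preferred
-- ===== SOURCE A (Python) =====
-- from typing import List, Optional, Tuple
--
-- def _pick_preferred(candidates: List[Tuple[str, str]]) -> Optional[str]:
--     if not candidates:
--         return None
--     for _, ip in candidates:
--         if ip.startswith("192.168."):
--             return ip
--     for _, ip in candidates:
--         if ip.startswith("10."):
--             return ip
--     return candidates[0][1]
-- ===== SOURCE B (Python) =====
-- from typing import List, Optional, Tuple
--
-- def _pick_preferred(candidates: List[Tuple[str, str]]) -> Optional[str]: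
--     if not candidates:
--         return None
--
--     def _rank(ip: str) -> int:
--         if ip.startswith("192.168."):
--             return 0
--         if ip.startswith("10."):
--             return 1
--         return 2
--
--     return min(candidates, key=lambda c: _rank(c[1]))[1]
-- ===== Notes on version B (the rewrite author's own statement) =====
-- stated objective: idiomatic
-- what changed: Replaces A's staged prefix scans and positional fallback with a numeric preference rank (192.168.->0, 10.->1, other->2) and a single min(candidates, key=rank), relying on min's first-minimum tie-breaking to reproduce A's priority-then-order choice.
import Mathlib
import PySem

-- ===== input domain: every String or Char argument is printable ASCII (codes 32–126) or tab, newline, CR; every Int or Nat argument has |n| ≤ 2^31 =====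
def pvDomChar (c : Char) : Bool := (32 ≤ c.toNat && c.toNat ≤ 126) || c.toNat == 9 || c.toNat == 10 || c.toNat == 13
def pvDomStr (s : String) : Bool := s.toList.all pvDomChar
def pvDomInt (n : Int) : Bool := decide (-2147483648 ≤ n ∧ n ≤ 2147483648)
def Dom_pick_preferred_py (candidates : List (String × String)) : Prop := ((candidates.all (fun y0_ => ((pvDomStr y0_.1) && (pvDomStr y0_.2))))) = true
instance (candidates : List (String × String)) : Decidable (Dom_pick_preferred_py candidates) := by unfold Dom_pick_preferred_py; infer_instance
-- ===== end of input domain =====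

-- B replaces A's staged prefix scans with a numeric rank and one min-by-key pass (objective: idiomatic).

-- ===== PORT A =====
-- one 'for _, ip in candidates: if ip.startswith(p): return ip' loop of A (A has two, with different prefixes)
def pickScan (p : String) : List (String × String) → Option String
  | [] => none
  | (_, ip) :: rest => if PySem.Str.startswith ip p then some ip else pickScan p rest

def pick_preferred_py (candidates : List (String × String)) : Option String :=
  if candidates = [] then none
  else
    match pickScan "192.168." candidates with
    | some ip => some ip
    | none =>
      match pickScan "10." candidates with
      | some ip => some ip
      | none =>
        match candidates with
        | [] => none
        | (_, ip) :: _ => some ip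

-- ===== PORT B =====
-- B's _rank helper: preference order as an integer
def pickRank (ip : String) : Int :=
  if PySem.Str.startswith ip "192.168." then 0
  else if PySem.Str.startswith ip "10." then 1
  else 2

def pick_preferred_py_alt (candidates : List (String × String)) : Option String :=
  if candidates = [] then none
  else
    -- min(candidates, key=lambda c: _rank(c[1]))[1]
    match PySem.List.min? candidates (fun c => pickRank c.2) with
    | some c => some c.2
    | none => none

-- ===== PRECONDITION & SPEC =====
def Spec_pick_preferred_py (candidates : List (String × String)) (out : Option String) : Prop := out = pick_preferred_py_alt candidates
instance (candidates : List (String × String)) (out : Option String) : Decidable (Spec_pick_preferred_py candidates out) := by unfold Spec_pick_preferred_py; infer_instance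

-- ===== CLAIM (what is proved, stated in full; the proofs are below) =====
def Claim_equal_pick_preferred_py : Prop := ∀ (candidates : List (String × String)), Dom_pick_preferred_py candidates → Spec_pick_preferred_py candidates (pick_preferred_py candidates)

-- ===== LEMMAS AND PROOFS =====

theorem find?_congr_mem {α : Type} (p q : α → Bool) (xs : List α)
    (h : ∀ x ∈ xs, p x = q x) : xs.find? p = xs.find? q := by
  induction xs with
  | nil => rfl
  | cons hd tl ih =>
    have hh := h hd (by simp)
    simp only [List.find?, hh]
    cases q hd with
    | true => rfl
    | false => exact ih (fun x hx => h x (by simp [hx]))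

-- PySem.List.min? (first minimum) on a cons list, characterised by the three possible ranks of the head
theorem min?_char (cs : List (String × String)) :
    ∀ m : String × String,
      PySem.List.min? (m :: cs) (fun c => pickRank c.2) =
      (if pickRank m.2 = 0 then some m
       else match cs.find? (fun c => pickRank c.2 == 0) with
       | some c => some c
       | none =>
         if pickRank m.2 = 1 then some m
         else match cs.find? (fun c => pickRank c.2 == 1) with
           | some c => some c
           | none => some m) := by
  induction cs with
  | nil =>
    intro m
    split_ifs <;> simp [PySem.List.min?]
  | cons hd tl ih =>
    intro m
    have hm : pickRank m.2 = 0 ∨ pickRank m.2 = 1 ∨ pickRank m.2 = 2 := by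
      unfold pickRank; split_ifs <;> simp
    have hh : pickRank hd.2 = 0 ∨ pickRank hd.2 = 1 ∨ pickRank hd.2 = 2 := by
      unfold pickRank; split_ifs <;> simp
    by_cases hlt : pickRank hd.2 < pickRank m.2
    · have step : PySem.List.min? (m :: hd :: tl) (fun c => pickRank c.2) =
          PySem.List.min? (hd :: tl) (fun c => pickRank c.2) := by
        simp [PySem.List.min?, List.foldl_cons, hlt]
      rw [step, ih hd]
      rcases hm with hm | hm | hm <;> rcases hh with hh | hh | hh <;>
        simp [List.find?, hm, hh] <;> omega
    · have step : PySem.List.min? (m :: hd :: tl) (fun c => pickRank c.2) =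
          PySem.List.min? (m :: tl) (fun c => pickRank c.2) := by
        simp [PySem.List.min?, List.foldl_cons, hlt]
      rw [step, ih m]
      rcases hm with hm | hm | hm <;> rcases hh with hh | hh | hh <;>
        simp [List.find?, hm, hh] <;> omega

theorem find?_rank0_eq (cs : List (String × String)) :
    cs.find? (fun c => pickRank c.2 == 0) =
      cs.find? (fun c => PySem.Str.startswith c.2 "192.168.") := by
  apply find?_congr_mem
  intro c _
  cases hs : PySem.Str.startswith c.2 "192.168." <;> simp at hs
  · simp [pickRank, hs]
    split_ifs <;> omega
  · simp [pickRank, hs]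

theorem pickScan_eq_find? (p : String) (cs : List (String × String)) :
    pickScan p cs = (cs.find? (fun c => PySem.Str.startswith c.2 p)).map (·.2) := by
  induction cs with
  | nil => rfl
  | cons hd tl ih =>
    obtain ⟨n, ip⟩ := hd
    simp only [pickScan, List.find?, ih]
    cases hb : PySem.Chars.startswith ip.toList p.toList <;>
      simp [PySem.Str.startswith, hb]

-- when no element starts with "192.168.", rank 1 means exactly startswith "10."
theorem find?_rank1_eq (cs : List (String × String))
    (h : ∀ c ∈ cs, PySem.Str.startswith c.2 "192.168." = false) :
    cs.find? (fun c => pickRank c.2 == 1) =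
      cs.find? (fun c => PySem.Str.startswith c.2 "10.") := by
  apply find?_congr_mem
  intro c hc
  have h192 := h c hc
  simp at h192
  cases hs : PySem.Str.startswith c.2 "10." <;>
    simp at hs <;> simp [pickRank, h192, hs]

-- ===== VERDICT (by name: the statement is the Claim_ definition above) =====
theorem pick_preferred_py_spec : Claim_equal_pick_preferred_py := by
  intro candidates _
  unfold Spec_pick_preferred_py pick_preferred_py pick_preferred_py_alt
  cases candidates with
  | nil => simp
  | cons hd tl =>
    simp only [reduceCtorEq, if_false]
    rw [min?_char tl hd]
    by_cases h192 : PySem.Str.startswith hd.2 "192.168." = true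
    all_goals simp at h192
    · -- head already starts with "192.168."
      have hr0 : pickRank hd.2 = 0 := by simp [pickRank, h192]
      obtain ⟨n, ip⟩ := hd
      simp only at h192 hr0
      simp [pickScan, PySem.Str.startswith, h192, hr0]
    · have hr0 : ¬ pickRank hd.2 = 0 := by
        simp [pickRank, h192]
        split_ifs <;> omega
      have hscan192 : pickScan "192.168." (hd :: tl) = pickScan "192.168." tl := by
        obtain ⟨n, ip⟩ := hd
        simp only at h192
        simp [pickScan, PySem.Str.startswith, h192]
      rw [hscan192, pickScan_eq_find? "192.168.", ← find?_rank0_eq]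
      simp only [hr0, if_false]
      cases hf0 : tl.find? (fun c => pickRank c.2 == 0) with
      | some c => simp
      | none =>
        have hno192tl : ∀ c ∈ tl, PySem.Str.startswith c.2 "192.168." = false := by
          intro c hc
          have := List.find?_eq_none.mp hf0 c hc
          simp only [beq_iff_eq] at this
          cases hs : PySem.Str.startswith c.2 "192.168."
          · rfl
          · simp at hs
            exact absurd (by simp [pickRank, hs]) this
        simp only [Option.map_none]
        by_cases h10 : PySem.Str.startswith hd.2 "10." = true
        all_goals simp at h10
        · have hr1 : pickRank hd.2 = 1 := by simp [pickRank, h192, h10]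
          obtain ⟨n, ip⟩ := hd
          simp only at h10 hr1
          simp [pickScan, PySem.Str.startswith, h10, hr1]
        · have hr1 : ¬ pickRank hd.2 = 1 := by
            simp [pickRank, h192, h10]
          have hscan10 : pickScan "10." (hd :: tl) = pickScan "10." tl := by
            obtain ⟨n, ip⟩ := hd
            simp only at h10
            simp [pickScan, PySem.Str.startswith, h10]
          rw [hscan10, pickScan_eq_find? "10.", ← find?_rank1_eq tl hno192tl]
          simp only [hr1, if_false]
          cases hf1 : tl.find? (fun c => pickRank c.2 == 1) with
          | some c => simp
          | none => simp
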